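-- pv_equiv track=rewrite | github.com/P4X-ng/metasploit-framework-pynative | tools/password/vxencrypt.py | hackit
-- ===== SOURCE A (Python) =====
-- def hackit(total):
--     """Apply VxWorks hash algorithm"""
--     magic = 31695317
--     res = str((total * magic) & 0xffffffff)
--
--     result = []
--     for c in res:
--         byte = ord(c)
--         if byte < 0x33:
--             byte += 0x21
--         if byte < 0x37:
--             byte += 0x2f
--         if byte < 0x39:
--             byte += 0x42
--         result.append(chr(byte))
--
--     return ''.join(result)
-- ===== SOURCE B (Python) =====
-- def _emit(n, acc):
--     """Build the hash back-to-front by arithmetic digit extraction."""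
--     if n == 0:
--         return acc
--     return _emit(n // 10, 'QRSbcdeyz9'[n % 10] + acc)
--
--
-- def hackit(total):
--     """Apply VxWorks hash algorithm"""
--     n = (total * 31695317) & 0xffffffff
--     return _emit(n // 10, 'QRSbcdeyz9'[n % 10])
-- ===== Notes on version B (the rewrite author's own statement) =====
-- stated objective: alternative
-- what changed: B never builds the decimal string: it extracts digits of the masked product arithmetically (divmod by 10) and assembles the encoded characters back-to-front recursively, instead of A's str() conversion followed by a per-character branch-cascade transform.
import Mathlib
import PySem

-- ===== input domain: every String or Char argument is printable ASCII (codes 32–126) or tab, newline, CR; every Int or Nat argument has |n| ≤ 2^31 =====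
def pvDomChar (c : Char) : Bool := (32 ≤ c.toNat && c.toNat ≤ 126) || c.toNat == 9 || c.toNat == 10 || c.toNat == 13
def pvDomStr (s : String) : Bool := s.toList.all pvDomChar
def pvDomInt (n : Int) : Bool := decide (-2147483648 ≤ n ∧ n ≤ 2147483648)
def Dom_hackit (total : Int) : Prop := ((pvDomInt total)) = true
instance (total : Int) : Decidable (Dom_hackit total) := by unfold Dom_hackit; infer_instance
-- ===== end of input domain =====

-- B never builds the decimal string: it extracts digits arithmetically and assembles
-- the encoded characters back-to-front recursively (alternative decomposition, same cost).

-- ===== PORT A =====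
-- the three cascaded ifs applied to one byte
def hackitStep (b : Nat) : Nat :=
  let b1 := if b < 0x33 then b + 0x21 else b
  let b2 := if b1 < 0x37 then b1 + 0x2f else b1
  if b2 < 0x39 then b2 + 0x42 else b2

def hackit (total : Int) : String :=
  let res := PySem.Int.toStr (PySem.Int.band (total * 31695317) 0xffffffff)
  let result := res.toList.foldl (fun acc c => acc ++ [Char.ofNat (hackitStep c.toNat)]) []
  String.ofList result

-- ===== PORT B =====
-- 'QRSbcdeyz9'[d] for a digit value d (string indexing in Source B)
def hackitChars : List Char := ['Q','R','S','b','c','d','e','y','z','9']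

-- _emit in Source B: recursive back-to-front assembly by divmod 10
def hackitEmit (n : Nat) (acc : List Char) : List Char :=
  if n = 0 then acc
  else hackitEmit (n / 10) (hackitChars.getD (n % 10) 'Q' :: acc)
decreasing_by exact Nat.div_lt_self (Nat.pos_of_ne_zero (by assumption)) (by omega)

def hackit_alt (total : Int) : String :=
  let n := (PySem.Int.band (total * 31695317) 0xffffffff).toNat
  String.ofList (hackitEmit (n / 10) [hackitChars.getD (n % 10) 'Q'])

-- ===== PRECONDITION & SPEC =====
def Spec_hackit (total : Int) (out : String) : Prop := out = hackit_alt total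
instance (total : Int) (out : String) : Decidable (Spec_hackit total out) := by unfold Spec_hackit; infer_instance

-- ===== CLAIM (what is proved, stated in full; the proofs are below) =====
def Claim_equal_hackit : Prop := ∀ (total : Int), Dom_hackit total → Spec_hackit total (hackit total)

-- ===== LEMMAS AND PROOFS =====

-- f is what A does to one character of the decimal string
def hackitF (c : Char) : Char := Char.ofNat (hackitStep c.toNat)

lemma hackitF_digitChar (d : Nat) (hd : d < 10) :
    hackitF (Nat.digitChar d) = hackitChars.getD d 'Q' := by
  interval_cases d <;> decide

-- mapping A's transform over toDigitsCore output equals B's recursive assembly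
lemma map_toDigitsCore_eq_emit (fuel : Nat) :
    ∀ (n : Nat) (acc : List Char), n < fuel →
    List.map hackitF (Nat.toDigitsCore 10 fuel n acc) =
      hackitEmit (n / 10) (hackitChars.getD (n % 10) 'Q' :: List.map hackitF acc) := by
  induction fuel with
  | zero => intro n acc h; omega
  | succ fuel ih =>
    intro n acc h
    rw [Nat.toDigitsCore]
    by_cases h0 : n / 10 = 0
    · simp [h0, hackitEmit, hackitF_digitChar _ (Nat.mod_lt _ (by omega))]
    · have h10 : 10 ≤ n := by
        by_contra hlt
        exact h0 (Nat.div_eq_of_lt (by omega))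
      have hfuel : n / 10 < fuel := by
        have := Nat.div_lt_self (by omega : 0 < n) (by omega : 1 < 10)
        omega
      rw [if_neg h0, ih _ _ hfuel]
      conv_rhs => rw [hackitEmit, if_neg h0]
      simp [hackitF_digitChar _ (Nat.mod_lt _ (by omega))]

lemma band_mask_nonneg (a : Int) : 0 ≤ PySem.Int.band a 0xffffffff := by
  rw [PySem.Int.band_comm]
  exact PySem.Int.band_nonneg_of_nonneg_left a (by decide)

-- A's foldl-append loop over the digit string is a map of hackitF
lemma hackit_eq_map (total : Int) :
    hackit total = String.ofList
      (List.map hackitF (PySem.Int.toChars (PySem.Int.band (total * 31695317) 0xffffffff))) := by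
  unfold hackit
  simp only [PySem.List.foldl_append_singleton_eq_map, PySem.Int.toList_toStr]
  rfl

lemma toChars_nonneg (n : Int) (hn : 0 ≤ n) :
    PySem.Int.toChars n = Nat.toDigits 10 n.toNat := by
  simp [PySem.Int.toChars, if_neg (not_lt.mpr hn)]

-- ===== VERDICT (by name: the statement is the Claim_ definition above) =====
theorem hackit_spec : Claim_equal_hackit := by
  intro total _
  unfold Spec_hackit
  rw [hackit_eq_map]
  unfold hackit_alt
  set m := PySem.Int.band (total * 31695317) 0xffffffff with hm
  rw [toChars_nonneg m (band_mask_nonneg _)]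
  unfold Nat.toDigits
  rw [map_toDigitsCore_eq_emit (m.toNat + 1) m.toNat [] (by omega)]
  rfl
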